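-- pv_equiv track=rewrite | github.com/apadrta/AoC | advent_of_code_2021/day12/solution.py | can_i_visit
-- ===== SOURCE A (Python) =====
-- def can_i_visit(path, move):
--     """
--     Check if move is first doubled
--     """
--     if move == 'start':
--         return False
--     checks = []
--     doubles = 0
--     for step in path + [move]:
--         if step[0].islower():
--             if step not in checks:
--                 checks.append(step)
--             else:
--                 doubles += 1
--     if doubles > 1:
--         return False
--     return True
-- ===== SOURCE B (Python) =====
-- def can_i_visit(path, move):
--     if move == 'start':
--         return False
--     smalls = sorted(s for s in path + [move] if s[:1].islower())
--     doubles = sum(1 for a, b in zip(smalls, smalls[1:]) if a == b)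
--     return doubles <= 1
-- ===== Notes on version B (the rewrite author's own statement) =====
-- stated objective: faster
-- what changed: Replaces A's incremental seen-list with a per-element linear membership scan and a doubles counter by a sort-then-scan: sort the small caves once and count adjacent equal pairs, which on a sorted list equals total minus distinct.
-- outside the precondition, e.g. on can_i_visit(['ab', ''], 'cd'): A raises IndexError, B returns True
import Mathlib
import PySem

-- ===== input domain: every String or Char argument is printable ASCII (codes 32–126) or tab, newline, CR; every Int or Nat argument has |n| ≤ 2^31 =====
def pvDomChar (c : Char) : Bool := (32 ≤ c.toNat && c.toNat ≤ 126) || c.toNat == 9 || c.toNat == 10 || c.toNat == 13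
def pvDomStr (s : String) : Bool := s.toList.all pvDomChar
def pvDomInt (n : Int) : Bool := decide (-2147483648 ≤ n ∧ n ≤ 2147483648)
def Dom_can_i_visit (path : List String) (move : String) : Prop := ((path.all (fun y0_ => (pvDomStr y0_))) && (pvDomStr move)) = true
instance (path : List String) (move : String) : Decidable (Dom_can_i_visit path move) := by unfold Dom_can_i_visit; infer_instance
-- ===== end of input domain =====

-- B sorts the small caves once and counts adjacent equal pairs, replacing A's incremental seen-list with its per-element membership scan (objective: faster, measured).



-- ===== PORT A =====
-- one loop step of A's for-loop: state = (checks, doubles); `none` from step[0] (IndexError) cannot occur inside Pre_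
def can_i_visit_step (acc : List String × Int) (step : String) : List String × Int :=
  match PySem.Str.pyGet? step 0 with
  | some c =>
      if PySem.Chars.islower c then
        if step ∈ acc.1 then (acc.1, acc.2 + 1) else (acc.1 ++ [step], acc.2)
      else acc
  | none => acc

def can_i_visit (path : List String) (move : String) : Bool :=
  if move == "start" then false
  else
    let r := (path ++ [move]).foldl can_i_visit_step ([], 0)
    if r.2 > 1 then false else true

-- ===== PORT B =====
-- `s[:1].islower()` of Source B: on a 0- or 1-char ASCII string this is exactly islower of the first char (False on "")
def pvSmall (s : String) : Bool :=
  match s.toList with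
  | [] => false
  | c :: _ => PySem.Chars.islower c

def can_i_visit_alt (path : List String) (move : String) : Bool :=
  if move == "start" then false
  else
    let smalls := PySem.List.sorted ((path ++ [move]).filter pvSmall) (fun x => x) false
    let doubles := (smalls.zip smalls.tail).countP (fun p => p.1 == p.2)
    decide (doubles ≤ 1)

-- ===== PRECONDITION & SPEC =====
-- Pre_ excludes exactly the inputs where A raises IndexError: an empty-string cave reached by the loop (move ≠ 'start' and '' occurs in path + [move]).
def Pre_can_i_visit (path : List String) (move : String) : Prop :=
  move = "start" ∨ ("" ∉ path ∧ move ≠ "")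
instance (path : List String) (move : String) : Decidable (Pre_can_i_visit path move) := by unfold Pre_can_i_visit; infer_instance
def pvWitness_can_i_visit : List String × String := (["start", "Ab", "bc"], "bc")

def Spec_can_i_visit (path : List String) (move : String) (out : Bool) : Prop := out = can_i_visit_alt path move
instance (path : List String) (move : String) (out : Bool) : Decidable (Spec_can_i_visit path move out) := by unfold Spec_can_i_visit; infer_instance

-- ===== CLAIM (what is proved, stated in full; the proofs are below) =====
def Claim_equal_can_i_visit : Prop := ∀ (path : List String) (move : String), Dom_can_i_visit path move → Pre_can_i_visit path move → Spec_can_i_visit path move (can_i_visit path move)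

-- ===== LEMMAS AND PROOFS =====

-- on a nonempty string, A's `step[0].islower()` test agrees with B's `s[:1].islower()`
lemma step_eq_of_ne_empty (acc : List String × Int) (s : String) (h : s ≠ "") :
    can_i_visit_step acc s =
      if pvSmall s then
        (if s ∈ acc.1 then (acc.1, acc.2 + 1) else (acc.1 ++ [s], acc.2))
      else acc := by
  have hl : s.toList ≠ [] := by
    simpa [String.toList_eq_nil_iff] using h
  cases hc : s.toList with
  | nil => exact absurd hc hl
  | cons c cs =>
    simp [can_i_visit_step, pvSmall, PySem.Str.pyGet?, hc]

-- A's loop invariant: checks is the ordered set of small caves seen, doubles = #smalls − #distinct smalls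
lemma loop_inv (l : List String) : ∀ (S : List String) (d : Int), (∀ s ∈ l, s ≠ "") →
    l.foldl can_i_visit_step (S, d) =
      (PySem.Set.update S (l.filter pvSmall),
       d + ((l.filter pvSmall).length : Int)
         - ((PySem.Set.update S (l.filter pvSmall)).length : Int) + (S.length : Int)) := by
  induction l with
  | nil => intro S d _; simp [PySem.Set.update]
  | cons x l ih =>
    intro S d hne
    have hx : x ≠ "" := hne x (by simp)
    have hrest : ∀ s ∈ l, s ≠ "" := fun s hs => hne s (by simp [hs])
    rw [List.foldl_cons, step_eq_of_ne_empty _ _ hx]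
    by_cases hp : pvSmall x
    · simp only [hp, if_pos]
      by_cases hmem : x ∈ S
      · have hadd : PySem.Set.add S x = S := by
          simp [PySem.Set.add, PySem.Set.contains, hmem]
        rw [if_pos hmem, ih S (d + 1) hrest]
        simp only [List.filter_cons, hp, if_true, PySem.Set.update, List.foldl_cons, hadd,
          Prod.mk.injEq, List.length_cons]
        refine ⟨trivial, by push_cast; ring⟩
      · have hadd : PySem.Set.add S x = S ++ [x] := by
          simp [PySem.Set.add, PySem.Set.contains, hmem]
        rw [if_neg hmem, ih (S ++ [x]) d hrest]
        simp only [List.filter_cons, hp, if_true, PySem.Set.update, List.foldl_cons, hadd,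
          Prod.mk.injEq, List.length_cons, List.length_append,
          List.length_nil]
        refine ⟨trivial, by push_cast; ring⟩
    · simp only [hp, if_neg, Bool.false_eq_true, not_false_iff]
      rw [ih S d hrest]
      simp [hp]

-- the ordered-dedup list has as many elements as the finset of the input
lemma ofList_length_eq_card (l : List String) :
    (PySem.Set.ofList l).length = l.toFinset.card := by
  have hnd : (PySem.Set.ofList l).Nodup := PySem.Set.nodup_ofList l
  have hfs : (PySem.Set.ofList l).toFinset = l.toFinset := by
    ext x
    simp [List.mem_toFinset, PySem.Set.mem_ofList]
  rw [← hfs, List.toFinset_card_of_nodup hnd]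

-- on a sorted list, (#adjacent equal pairs) + (#distinct values) = length
lemma adj_dup_count (l : List String) (h : l.Pairwise (· ≤ ·)) :
    (l.zip l.tail).countP (fun p => p.1 == p.2) + l.toFinset.card = l.length := by
  induction l with
  | nil => simp
  | cons x t ih =>
    cases t with
    | nil => simp
    | cons y t' =>
      have hxy : x ≤ y := (List.pairwise_cons.1 h).1 y (by simp)
      have ht : (y :: t').Pairwise (· ≤ ·) := (List.pairwise_cons.1 h).2
      have ih' := ih ht
      rw [List.tail_cons, List.zip_cons_cons, List.countP_cons] at *
      by_cases hxy' : x = y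
      · subst hxy'
        have hcard : (x :: x :: t').toFinset.card = (x :: t').toFinset.card := by
          simp
        simp only [List.length_cons] at *
        simp only [hcard, beq_self_eq_true, if_pos]
        omega
      · have hxt : x ∉ (y :: t') := by
          intro hmem
          rcases List.mem_cons.1 hmem with h1 | h1
          · exact hxy' h1
          · have hyx : y ≤ x := (List.pairwise_cons.1 ht).1 x h1
            exact hxy' (le_antisymm hxy hyx)
        have hcard : (x :: y :: t').toFinset.card = (y :: t').toFinset.card + 1 := by
          rw [List.toFinset_cons, Finset.card_insert_of_notMem (by simpa using hxt)]
        have hbe : (x == y) = false := beq_eq_false_iff_ne.2 hxy'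
        simp only [List.length_cons, hbe, Bool.false_eq_true, if_false] at *
        omega

-- ===== VERDICT (by name: the statement is the Claim_ definition above) =====
theorem can_i_visit_spec : Claim_equal_can_i_visit := by
  intro path move _ hpre
  unfold Spec_can_i_visit can_i_visit can_i_visit_alt
  by_cases hs : move = "start"
  · simp [hs]
  · have hne : ∀ s ∈ path ++ [move], s ≠ "" := by
      rcases hpre with h | ⟨hp, hm⟩
      · exact absurd h hs
      · intro s hsmem
        rcases List.mem_append.1 hsmem with h1 | h1
        · intro he; exact hp (he ▸ h1)
        · simp at h1; exact h1 ▸ hm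
    have hmv : (move == "start") = false := by simp [hs]
    rw [hmv]
    simp only [Bool.false_eq_true, if_false]
    rw [loop_inv (path ++ [move]) [] 0 hne]
    have hupd : PySem.Set.update ([] : List String) ((path ++ [move]).filter pvSmall)
        = PySem.Set.ofList ((path ++ [move]).filter pvSmall) := by
      simp [PySem.Set.ofList_eq_foldl, PySem.Set.update]
    rw [hupd]
    have hpair : (PySem.List.sorted ((path ++ [move]).filter pvSmall) (fun x => x) false).Pairwise (· ≤ ·) := by
      simpa using PySem.List.sorted_pairwise ((path ++ [move]).filter pvSmall) (fun x => x)
    have hadj := adj_dup_count _ hpair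
    have hperm : (PySem.List.sorted ((path ++ [move]).filter pvSmall) (fun x => x) false).Perm
        ((path ++ [move]).filter pvSmall) := PySem.List.sorted_perm _ _ _
    have hlen := hperm.length_eq
    have hfs := List.toFinset_eq_of_perm _ _ hperm
    have hof := ofList_length_eq_card ((path ++ [move]).filter pvSmall)
    have hkey : ((PySem.List.sorted ((path ++ [move]).filter pvSmall) (fun x => x) false).zip
          (PySem.List.sorted ((path ++ [move]).filter pvSmall) (fun x => x) false).tail).countP
          (fun p => p.1 == p.2)
        + (PySem.Set.ofList ((path ++ [move]).filter pvSmall)).length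
        = ((path ++ [move]).filter pvSmall).length := by
      rw [hof, ← hfs, ← hlen]; exact hadj
    simp only [List.length_nil, Nat.cast_zero, add_zero, zero_add]
    by_cases hc2 : ((PySem.List.sorted ((path ++ [move]).filter pvSmall) (fun x => x) false).zip
        (PySem.List.sorted ((path ++ [move]).filter pvSmall) (fun x => x) false).tail).countP
        (fun p => p.1 == p.2) ≤ 1
    · rw [if_neg (by omega), decide_eq_true hc2]
    · rw [if_pos (by omega), decide_eq_false hc2]
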